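-- pv_equiv track=rewrite | github.com/DINO060/LINK-BOT | linkfinderbot/src/bot/handlers/messages.py | _parse_episode_flag
-- ===== SOURCE A (Python) =====
-- def _parse_episode_flag(parts):
--     """Parse les flags --episode N dans une liste de mots"""
--     episode = None
--     rest = []
--     it = iter(parts)
--     for tok in it:
--         if tok == "--episode":
--             try:
--                 episode = int(next(it))
--             except (StopIteration, ValueError):
--                 pass
--         else:
--             rest.append(tok)
--     return " ".join(rest).strip(), episode
-- ===== SOURCE B (Python) =====
-- def _try_int(s):
--     try:
--         return int(s)
--     except ValueError:
--         return None
--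
--
-- def _parse_episode_flag(parts):
--     """Parse les flags --episode N dans une liste de mots.
--
--     Staged passes instead of one fused loop: first classify every token as a
--     plain word, a flag, or a flag argument (a 'pending' bit carries the
--     consumption across positions); then the kept words and the flag arguments
--     are read off by comprehensions, and the episode is the first successfully
--     parsed argument scanning the arguments from the end ('last successful
--     assignment wins')."""
--     roles = []
--     pending = False
--     for tok in parts:
--         if pending:
--             roles.append("arg")
--             pending = False
--         elif tok == "--episode":
--             roles.append("flag")
--             pending = True
--         else:
--             roles.append("word")
--     words = [t for t, r in zip(parts, roles) if r == "word"]
--     args = [t for t, r in zip(parts, roles) if r == "arg"]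
--     episode = next((v for v in map(_try_int, reversed(args)) if v is not None), None)
--     return " ".join(words).strip(), episode
-- ===== Notes on version B (the rewrite author's own statement) =====
-- stated objective: alternative
-- what changed: Replaces A's single fused loop with mutable state (episode overwritten in place, argument consumed from a shared iterator) by staged passes: a classification pass labels each token word/flag/arg via a pending bit, then comprehensions read off the kept words and the flag arguments, and the episode is the first successfully parsed argument scanning the arguments in reverse.
import Mathlib
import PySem

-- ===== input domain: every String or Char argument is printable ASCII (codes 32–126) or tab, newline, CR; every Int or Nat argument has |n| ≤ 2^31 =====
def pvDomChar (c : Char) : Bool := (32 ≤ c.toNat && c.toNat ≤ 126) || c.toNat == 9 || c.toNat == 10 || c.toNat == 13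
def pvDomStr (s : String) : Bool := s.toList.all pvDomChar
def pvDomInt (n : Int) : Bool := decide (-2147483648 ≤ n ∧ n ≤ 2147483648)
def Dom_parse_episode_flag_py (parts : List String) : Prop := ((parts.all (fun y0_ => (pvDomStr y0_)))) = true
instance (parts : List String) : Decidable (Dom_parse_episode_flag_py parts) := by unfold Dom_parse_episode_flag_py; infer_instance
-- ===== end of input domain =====

-- B replaces A's fused loop with mutable state (overwritten episode, consuming iterator) by
-- staged passes: classify tokens into word/flag/arg roles, then read the words and the
-- episode (first successful parse of the arguments scanned in reverse) off the roles;
-- same values, objective: alternative.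

-- ===== PORT A =====
-- A's 'for tok in it' with 'next(it)' inside = structural recursion on the remaining list
-- carrying A's two mutable accumulators (rest, episode); the flag branch consumes the
-- following element (StopIteration when the iterator is empty ends the loop).
def pvGoA : List String → List String → Option Int → String × Option Int
  | [], rest, ep => (PySem.Str.strip (PySem.Str.join " " rest), ep)
  | t :: ts, rest, ep =>
    if t = "--episode" then
      match ts with
      | [] => (PySem.Str.strip (PySem.Str.join " " rest), ep)  -- next(it) raises StopIteration: loop ends
      | nx :: ts' =>
        pvGoA ts' rest (match PySem.Int.ofStr? nx with
          | some v => some v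
          | none => ep)        -- ValueError: pass (episode unchanged)
    else pvGoA ts (rest ++ [t]) ep

def parse_episode_flag_py (parts : List String) : String × Option Int :=
  pvGoA parts [] none

-- ===== PORT B =====
-- Source B's classification loop: the 'pending' bit says the current token is a flag argument.
def pvClassify : List String → Bool → List String
  | [], _ => []
  | t :: ts, pending =>
    if pending then "arg" :: pvClassify ts false
    else if t = "--episode" then "flag" :: pvClassify ts true
    else "word" :: pvClassify ts false

-- Source B's '_try_int' = PySem.Int.ofStr?; 'next((v for v in map(_try_int, reversed(args))
-- if v is not None), None)' = findSome? over the reversed argument list.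
def parse_episode_flag_py_alt (parts : List String) : String × Option Int :=
  let roles := pvClassify parts false
  let words := ((parts.zip roles).filter (fun p => p.2 == "word")).map (fun p => p.1)
  let args := ((parts.zip roles).filter (fun p => p.2 == "arg")).map (fun p => p.1)
  let episode := (args.reverse.map PySem.Int.ofStr?).findSome? id
  (PySem.Str.strip (PySem.Str.join " " words), episode)

-- ===== PRECONDITION & SPEC =====
def Spec_parse_episode_flag_py (parts : List String) (out : String × Option Int) : Prop := out = parse_episode_flag_py_alt parts
instance (parts : List String) (out : String × Option Int) : Decidable (Spec_parse_episode_flag_py parts out) := by unfold Spec_parse_episode_flag_py; infer_instance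

-- ===== CLAIM (what is proved, stated in full; the proofs are below) =====
def Claim_equal_parse_episode_flag_py : Prop := ∀ (parts : List String), Dom_parse_episode_flag_py parts → Spec_parse_episode_flag_py parts (parse_episode_flag_py parts)

-- ===== LEMMAS AND PROOFS =====

-- the words / episode that B reads off the classification of l (pending = false)
def pvWordsOf (l : List String) : List String :=
  ((l.zip (pvClassify l false)).filter (fun p => p.2 == "word")).map (fun p => p.1)
def pvEpOf (l : List String) : Option Int :=
  ((((l.zip (pvClassify l false)).filter (fun p => p.2 == "arg")).map
      (fun p => p.1)).reverse.map PySem.Int.ofStr?).findSome? id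

theorem pvWordsOf_nil : pvWordsOf [] = [] := rfl
theorem pvEpOf_nil : pvEpOf [] = none := rfl

theorem pvWordsOf_flag_nil : pvWordsOf ["--episode"] = [] := rfl
theorem pvEpOf_flag_nil : pvEpOf ["--episode"] = none := rfl

theorem pvWordsOf_flag_cons (x : String) (ts : List String) :
    pvWordsOf ("--episode" :: x :: ts) = pvWordsOf ts := by
  simp [pvWordsOf, pvClassify]

theorem pvOrMatch (o y : Option Int) :
    o.or y = (match o with | some v => some v | none => y) := by cases o <;> rfl

theorem pvEpOf_flag_cons (x : String) (ts : List String) :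
    pvEpOf ("--episode" :: x :: ts) =
      match pvEpOf ts with
      | some v => some v
      | none => PySem.Int.ofStr? x := by
  simp only [pvEpOf, pvClassify]
  simp [List.findSome?_append]
  exact pvOrMatch _ _

theorem pvWordsOf_word (t : String) (ts : List String) (ht : ¬ t = "--episode") :
    pvWordsOf (t :: ts) = t :: pvWordsOf ts := by
  simp [pvWordsOf, pvClassify, ht]

theorem pvEpOf_word (t : String) (ts : List String) (ht : ¬ t = "--episode") :
    pvEpOf (t :: ts) = pvEpOf ts := by
  simp [pvEpOf, pvClassify, ht]

-- A's accumulator run over l equals B's staged reading of l, with the accumulators folded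
-- in: 'rest' is prepended to B's kept words, and B's episode overrides 'ep'.
theorem pvGoA_eq_staged : ∀ (l rest : List String) (ep : Option Int),
    pvGoA l rest ep =
      (PySem.Str.strip (PySem.Str.join " " (rest ++ pvWordsOf l)),
       match pvEpOf l with | some v => some v | none => ep)
  | [], rest, ep => by simp [pvGoA, pvWordsOf_nil, pvEpOf_nil]
  | t :: ts, rest, ep => by
    by_cases ht : t = "--episode"
    · subst ht
      match ts with
      | [] => simp [pvGoA, pvWordsOf_flag_nil, pvEpOf_flag_nil]
      | x :: ts' =>
        rw [pvGoA.eq_def]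
        simp only
        rw [pvGoA_eq_staged ts' rest _, pvWordsOf_flag_cons, pvEpOf_flag_cons]
        cases h2 : pvEpOf ts' <;> cases h3 : PySem.Int.ofStr? x <;> simp [h2, h3]
    · rw [pvGoA.eq_def]
      simp only [if_neg ht]
      rw [pvGoA_eq_staged ts (rest ++ [t]) ep, pvWordsOf_word t ts ht, pvEpOf_word t ts ht]
      simp

-- ===== VERDICT (by name: the statement is the Claim_ definition above) =====
theorem parse_episode_flag_py_spec : Claim_equal_parse_episode_flag_py := by
  intro parts _
  unfold Spec_parse_episode_flag_py parse_episode_flag_py parse_episode_flag_py_alt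
  rw [pvGoA_eq_staged]
  show _ = (_, pvEpOf parts)
  cases h : pvEpOf parts <;> simp [pvWordsOf, h]
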